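-- pv_equiv track=rewrite | github.com/ahdeshpande/Interview-Questions | String/string_anagrams.py | sum_characters
-- ===== SOURCE A (Python) =====
-- def sum_characters(s):
-- 	start = 0
-- 	end = len(s) - 1
--
-- 	total = 0
--
-- 	while start <= end:
-- 		total += ord(s[start])
-- 		if start != end:
-- 			total += ord(s[end])
-- 		start += 1
-- 		end -= 1
--
-- 	return total
-- ===== SOURCE B (Python) =====
-- def sum_characters(s):
--     total = 0
--     for c in s:
--         total += ord(c)
--     return total
-- ===== Notes on version B (the rewrite author's own statement) =====
-- stated objective: simpler
-- what changed: Replaced the two-pointer inward walk with its mid-element special case by a single forward accumulator loop over the characters.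
import Mathlib
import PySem

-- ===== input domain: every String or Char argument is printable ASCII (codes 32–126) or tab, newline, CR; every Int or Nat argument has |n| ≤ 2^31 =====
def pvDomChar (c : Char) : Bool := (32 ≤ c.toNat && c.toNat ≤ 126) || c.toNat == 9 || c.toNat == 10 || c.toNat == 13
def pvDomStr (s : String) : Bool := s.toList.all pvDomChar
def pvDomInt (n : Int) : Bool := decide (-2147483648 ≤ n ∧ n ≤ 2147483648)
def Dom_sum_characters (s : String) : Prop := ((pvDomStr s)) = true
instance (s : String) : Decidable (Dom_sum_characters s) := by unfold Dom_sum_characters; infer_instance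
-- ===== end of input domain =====

-- B replaces A's two-pointer inward walk (with its mid-element branch) by one forward accumulator pass; simpler, same cost.

-- ===== PORT A =====
-- ord(s[i]) for an in-range index (the loop keeps 0 ≤ start ≤ end < len)
def pvOrdAt (cs : List Char) (i : Int) : Int :=
  ((PySem.List.pyGet? cs i).map (fun c => (c.toNat : Int))).getD 0

-- the while loop: state (start, end, total)
def pvLoopA (cs : List Char) (start stop total : Int) : Int :=
  if _h : start ≤ stop then
    pvLoopA cs (start + 1) (stop - 1)
      (total + pvOrdAt cs start + (if start ≠ stop then pvOrdAt cs stop else 0))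
  else total
termination_by (stop + 1 - start).toNat
decreasing_by omega

def sum_characters (s : String) : Int :=
  pvLoopA s.toList 0 ((s.toList.length : Int) - 1) 0

-- ===== PORT B =====
def sum_characters_alt (s : String) : Int :=
  s.toList.foldl (fun total c => total + (c.toNat : Int)) 0

-- ===== PRECONDITION & SPEC =====
def Spec_sum_characters (s : String) (out : Int) : Prop := out = sum_characters_alt s
instance (s : String) (out : Int) : Decidable (Spec_sum_characters s out) := by unfold Spec_sum_characters; infer_instance

-- ===== CLAIM (what is proved, stated in full; the proofs are below) =====
def Claim_equal_sum_characters : Prop := ∀ (s : String), Dom_sum_characters s → Spec_sum_characters s (sum_characters s)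

-- ===== LEMMAS AND PROOFS =====

-- sum of ords over the segment [a..b], front-to-back
def pvSeg (cs : List Char) (a b : Int) : Int :=
  if _h : a ≤ b then pvOrdAt cs a + pvSeg cs (a + 1) b else 0
termination_by (b + 1 - a).toNat
decreasing_by omega

theorem pvSeg_pos (cs : List Char) (a b : Int) (h : a ≤ b) :
    pvSeg cs a b = pvOrdAt cs a + pvSeg cs (a + 1) b := by
  rw [pvSeg, dif_pos h]

theorem pvSeg_neg (cs : List Char) (a b : Int) (h : ¬ a ≤ b) :
    pvSeg cs a b = 0 := by
  rw [pvSeg, dif_neg h]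

theorem pvLoopA_pos (cs : List Char) (a b t : Int) (h : a ≤ b) :
    pvLoopA cs a b t
      = pvLoopA cs (a + 1) (b - 1) (t + pvOrdAt cs a + (if a ≠ b then pvOrdAt cs b else 0)) := by
  rw [pvLoopA, dif_pos h]

theorem pvLoopA_neg (cs : List Char) (a b t : Int) (h : ¬ a ≤ b) :
    pvLoopA cs a b t = t := by
  rw [pvLoopA, dif_neg h]

theorem pvSeg_last (cs : List Char) (a b : Int) (h : a ≤ b) :
    pvSeg cs a b = pvSeg cs a (b - 1) + pvOrdAt cs b := by
  induction hn : (b - a).toNat generalizing a with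
  | zero =>
    have hab : a = b := by omega
    subst hab
    rw [pvSeg_pos cs a a le_rfl, pvSeg_neg cs (a + 1) a (by omega),
        pvSeg_neg cs a (a - 1) (by omega)]
    ring
  | succ n ih =>
    have h1 : a + 1 ≤ b := by omega
    rw [pvSeg_pos cs a b h, ih (a + 1) h1 (by omega),
        pvSeg_pos cs a (b - 1) (by omega)]
    ring

theorem pvLoopA_eq_seg (cs : List Char) (a b total : Int) :
    pvLoopA cs a b total = total + pvSeg cs a b := by
  by_cases h : a ≤ b
  · induction hn : (b - a).toNat using Nat.strong_induction_on generalizing a b total with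
    | _ n ih =>
      rw [pvLoopA_pos cs a b total h]
      by_cases hab : a = b
      · subst hab
        rw [pvLoopA_neg cs (a + 1) (a - 1) _ (by omega),
            pvSeg_pos cs a a le_rfl, pvSeg_neg cs (a + 1) a (by omega)]
        simp
      · by_cases h2 : a + 1 ≤ b - 1
        · rw [ih ((b - 1) - (a + 1)).toNat (by omega) _ _ _ h2 rfl,
              pvSeg_pos cs a b h,
              pvSeg_last cs (a + 1) b (by omega), if_pos hab]
          ring
        · have hb : b = a + 1 := by omega
          subst hb
          rw [pvLoopA_neg cs (a + 1) (a + 1 - 1) _ (by omega),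
              pvSeg_pos cs a (a + 1) h, pvSeg_pos cs (a + 1) (a + 1) le_rfl,
              pvSeg_neg cs (a + 1 + 1) (a + 1) (by omega), if_pos hab]
          ring
  · rw [pvLoopA_neg cs a b total h, pvSeg_neg cs a b h]; ring

theorem pvOrdAt_cons_succ (c : Char) (cs : List Char) (i : Int) (hi : 0 ≤ i) :
    pvOrdAt (c :: cs) (i + 1) = pvOrdAt cs i := by
  obtain ⟨n, rfl⟩ := Int.eq_ofNat_of_zero_le hi
  unfold pvOrdAt
  rw [PySem.List.pyGet?_cons_succ]

theorem pvSeg_shift (c : Char) (cs : List Char) (a b : Int) (ha : 0 ≤ a) :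
    pvSeg (c :: cs) (a + 1) (b + 1) = pvSeg cs a b := by
  by_cases h : a ≤ b
  · induction hn : (b - a).toNat generalizing a with
    | zero =>
      have hab : a = b := by omega
      subst hab
      rw [pvSeg_pos (c :: cs) (a + 1) (a + 1) le_rfl,
          pvSeg_neg (c :: cs) (a + 1 + 1) (a + 1) (by omega),
          pvSeg_pos cs a a le_rfl, pvSeg_neg cs (a + 1) a (by omega),
          pvOrdAt_cons_succ c cs a ha]
    | succ n ih =>
      rw [pvSeg_pos (c :: cs) (a + 1) (b + 1) (by omega),
          pvSeg_pos cs a b h, pvOrdAt_cons_succ c cs a ha,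
          ih (a + 1) (by omega) (by omega) (by omega)]
  · rw [pvSeg_neg (c :: cs) (a + 1) (b + 1) (by omega), pvSeg_neg cs a b h]

theorem pvSeg_eq_sum (cs : List Char) :
    pvSeg cs 0 ((cs.length : Int) - 1) = (cs.map (fun c => (c.toNat : Int))).sum := by
  induction cs with
  | nil => rw [pvSeg_neg _ _ _ (by simp)]; simp
  | cons c cs ih =>
    have hord : pvOrdAt (c :: cs) 0 = (c.toNat : Int) := by
      simp [pvOrdAt, PySem.List.pyGet?, PySem.List.pyIdx?]
    by_cases hnil : cs = []
    · subst hnil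
      rw [pvSeg_pos _ _ _ (by simp), pvSeg_neg _ _ _ (by simp), hord]
      simp
    · have hlen : 0 < cs.length := List.length_pos_iff.mpr hnil
      have he : ((c :: cs).length : Int) - 1 = ((cs.length : Int) - 1) + 1 := by
        simp
      rw [pvSeg_pos _ _ _ (by simp), hord, he,
          show (0 : Int) + 1 = 0 + 1 from rfl,
          pvSeg_shift c cs 0 ((cs.length : Int) - 1) le_rfl, ih]
      simp

theorem foldl_add_sum (cs : List Char) (t : Int) :
    cs.foldl (fun total c => total + (c.toNat : Int)) t
      = t + (cs.map (fun c => (c.toNat : Int))).sum := by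
  induction cs generalizing t with
  | nil => simp
  | cons c cs ih => simp [List.foldl, ih]; ring

-- ===== VERDICT (by name: the statement is the Claim_ definition above) =====
theorem sum_characters_spec : Claim_equal_sum_characters := by
  intro s _
  unfold Spec_sum_characters sum_characters sum_characters_alt
  rw [pvLoopA_eq_seg, pvSeg_eq_sum, foldl_add_sum]
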